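-- pv_equiv track=rewrite | github.com/schirrmacher/malwi | util/analyze_missing_opcodes.py | categorize_missing_opcodes
-- ===== SOURCE A (Python) =====
-- CRITICAL_OPCODES = {
--     "UNPACK_SEQUENCE": "Tuple/list unpacking - common in malicious scripts",
--     "BUILD_STRING": "F-string construction - used in dynamic code generation",
--     "FORMAT_VALUE": "F-string value formatting - used in obfuscation",
--     "LIST_APPEND": "List comprehension optimization - memory attacks",
--     "SET_ADD": "Set comprehension optimization",
--     "MAP_ADD": "Dict comprehension optimization",
--     "YIELD_VALUE": "Generator yield - async malware patterns",
--     "DELETE_NAME": "Variable deletion - anti-analysis technique",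
--     "DELETE_SUBSCR": "Subscript deletion - data manipulation",
-- }
--
-- HIGH_PRIORITY_OPCODES = {
--     "BINARY_SUBSCR": "Array/dict access - data exfiltration patterns",
--     "STORE_SUBSCR": "Array/dict assignment - payload injection",
--     "BUILD_SLICE": "Slice operations - data manipulation",
--     "EXTENDED_ARG": "Extended argument support for large constants",
--     "LOAD_CLOSURE": "Closure loading - advanced obfuscation",
--     "MAKE_FUNCTION": "Function creation with closure",
--     "SETUP_EXCEPT": "Exception handling setup - error hiding",
--     "POP_EXCEPT": "Exception cleanup",
--     "RERAISE": "Exception reraising",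
-- }
--
-- MEDIUM_PRIORITY_OPCODES = {
--     "SETUP_FINALLY": "Finally block setup",
--     "SETUP_WITH": "Context manager setup - file operations",
--     "WITH_CLEANUP_START": "Context manager cleanup",
--     "WITH_CLEANUP_FINISH": "Context manager cleanup completion",
--     "GET_AWAITABLE": "Async operations",
--     "GET_AITER": "Async iteration",
--     "GET_ANEXT": "Async next",
--     "BEFORE_ASYNC_WITH": "Async context manager",
-- }
--
-- LOW_PRIORITY_OPCODES = {
--     "SETUP_ANNOTATIONS": "Type annotation setup",
--     "BUILD_CONST_KEY_MAP": "Constant key mapping optimization",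
--     "DICT_MERGE": "Dictionary merging (Python 3.9+)",
--     "DICT_UPDATE": "Dictionary update operations",
--     "LIST_EXTEND": "List extend operations",
--     "SET_UPDATE": "Set update operations",
--     "MATCH_SEQUENCE": "Pattern matching (Python 3.10+)",
--     "MATCH_MAPPING": "Mapping pattern matching",
--     "MATCH_CLASS": "Class pattern matching",
--     "MATCH_KEYS": "Key matching in patterns",
-- }
--
-- IGNORABLE_OPCODES = {
--     "CACHE": "Internal caching - not relevant for analysis",
--     "RESUME": "Internal resume operation",
--     "PRECALL": "Pre-call optimization",
--     "KW_NAMES": "Keyword argument names",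
--     "PUSH_NULL": "Internal stack operation",
--     "COPY": "Internal copy operation",
--     "SWAP": "Internal swap operation",
-- }
--
-- def categorize_missing_opcodes(missing_opcodes):
--     """Categorize missing opcodes by priority"""
--     categorized = {
--         "Critical": {},
--         "High Priority": {},
--         "Medium Priority": {},
--         "Low Priority": {},
--         "Ignorable": {},
--         "Unknown": {},
--     }
--
--     for opcode in missing_opcodes:
--         if opcode in CRITICAL_OPCODES:
--             categorized["Critical"][opcode] = CRITICAL_OPCODES[opcode]
--         elif opcode in HIGH_PRIORITY_OPCODES:
--             categorized["High Priority"][opcode] = HIGH_PRIORITY_OPCODES[opcode]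
--         elif opcode in MEDIUM_PRIORITY_OPCODES:
--             categorized["Medium Priority"][opcode] = MEDIUM_PRIORITY_OPCODES[opcode]
--         elif opcode in LOW_PRIORITY_OPCODES:
--             categorized["Low Priority"][opcode] = LOW_PRIORITY_OPCODES[opcode]
--         elif opcode in IGNORABLE_OPCODES:
--             categorized["Ignorable"][opcode] = IGNORABLE_OPCODES[opcode]
--         else:
--             categorized["Unknown"][opcode] = "Unknown opcode - needs investigation"
--
--     return categorized
-- ===== SOURCE B (Python) =====
-- CRITICAL_OPCODES = {
--     "UNPACK_SEQUENCE": "Tuple/list unpacking - common in malicious scripts",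
--     "BUILD_STRING": "F-string construction - used in dynamic code generation",
--     "FORMAT_VALUE": "F-string value formatting - used in obfuscation",
--     "LIST_APPEND": "List comprehension optimization - memory attacks",
--     "SET_ADD": "Set comprehension optimization",
--     "MAP_ADD": "Dict comprehension optimization",
--     "YIELD_VALUE": "Generator yield - async malware patterns",
--     "DELETE_NAME": "Variable deletion - anti-analysis technique",
--     "DELETE_SUBSCR": "Subscript deletion - data manipulation",
-- }
--
-- HIGH_PRIORITY_OPCODES = {
--     "BINARY_SUBSCR": "Array/dict access - data exfiltration patterns",
--     "STORE_SUBSCR": "Array/dict assignment - payload injection",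
--     "BUILD_SLICE": "Slice operations - data manipulation",
--     "EXTENDED_ARG": "Extended argument support for large constants",
--     "LOAD_CLOSURE": "Closure loading - advanced obfuscation",
--     "MAKE_FUNCTION": "Function creation with closure",
--     "SETUP_EXCEPT": "Exception handling setup - error hiding",
--     "POP_EXCEPT": "Exception cleanup",
--     "RERAISE": "Exception reraising",
-- }
--
-- MEDIUM_PRIORITY_OPCODES = {
--     "SETUP_FINALLY": "Finally block setup",
--     "SETUP_WITH": "Context manager setup - file operations",
--     "WITH_CLEANUP_START": "Context manager cleanup",
--     "WITH_CLEANUP_FINISH": "Context manager cleanup completion",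
--     "GET_AWAITABLE": "Async operations",
--     "GET_AITER": "Async iteration",
--     "GET_ANEXT": "Async next",
--     "BEFORE_ASYNC_WITH": "Async context manager",
-- }
--
-- LOW_PRIORITY_OPCODES = {
--     "SETUP_ANNOTATIONS": "Type annotation setup",
--     "BUILD_CONST_KEY_MAP": "Constant key mapping optimization",
--     "DICT_MERGE": "Dictionary merging (Python 3.9+)",
--     "DICT_UPDATE": "Dictionary update operations",
--     "LIST_EXTEND": "List extend operations",
--     "SET_UPDATE": "Set update operations",
--     "MATCH_SEQUENCE": "Pattern matching (Python 3.10+)",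
--     "MATCH_MAPPING": "Mapping pattern matching",
--     "MATCH_CLASS": "Class pattern matching",
--     "MATCH_KEYS": "Key matching in patterns",
-- }
--
-- IGNORABLE_OPCODES = {
--     "CACHE": "Internal caching - not relevant for analysis",
--     "RESUME": "Internal resume operation",
--     "PRECALL": "Pre-call optimization",
--     "KW_NAMES": "Keyword argument names",
--     "PUSH_NULL": "Internal stack operation",
--     "COPY": "Internal copy operation",
--     "SWAP": "Internal swap operation",
-- }
--
-- # The five priority tables have pairwise disjoint keys, so each category can be
-- # computed independently by filtering the input against its own table.
-- _TABLES = [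
--     ("Critical", CRITICAL_OPCODES),
--     ("High Priority", HIGH_PRIORITY_OPCODES),
--     ("Medium Priority", MEDIUM_PRIORITY_OPCODES),
--     ("Low Priority", LOW_PRIORITY_OPCODES),
--     ("Ignorable", IGNORABLE_OPCODES),
-- ]
-- _KNOWN = set().union(*(t.keys() for _, t in _TABLES))
--
-- def categorize_missing_opcodes(missing_opcodes):
--     """Categorize missing opcodes by priority: one filtering pass per category."""
--     categorized = {}
--     for label, table in _TABLES:
--         categorized[label] = {op: table[op] for op in missing_opcodes if op in table}
--     categorized["Unknown"] = {
--         op: "Unknown opcode - needs investigation"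
--         for op in missing_opcodes
--         if op not in _KNOWN
--     }
--     return categorized
-- ===== Notes on version B (the rewrite author's own statement) =====
-- stated objective: alternative
-- what changed: B replaces A's single pass with a per-element five-way if/elif dispatch by six independent staged passes: one filtering dict comprehension per category (valid because the five priority tables have pairwise disjoint keys), plus a final pass collecting opcodes outside the precomputed union of all known keys as Unknown.
import Mathlib
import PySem

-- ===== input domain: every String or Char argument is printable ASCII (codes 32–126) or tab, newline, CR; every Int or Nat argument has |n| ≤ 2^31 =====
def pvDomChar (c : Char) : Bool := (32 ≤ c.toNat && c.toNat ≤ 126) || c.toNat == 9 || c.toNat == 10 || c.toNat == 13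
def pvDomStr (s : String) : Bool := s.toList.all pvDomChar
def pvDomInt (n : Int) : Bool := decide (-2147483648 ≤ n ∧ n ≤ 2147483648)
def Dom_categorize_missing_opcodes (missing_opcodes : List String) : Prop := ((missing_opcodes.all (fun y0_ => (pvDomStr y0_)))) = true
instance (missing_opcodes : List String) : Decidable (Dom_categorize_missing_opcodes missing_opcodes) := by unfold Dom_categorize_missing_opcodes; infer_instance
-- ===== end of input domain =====

-- B replaces A's one-pass five-way if/elif dispatch by six independent filtering passes,
-- one per category (valid because the five priority tables have disjoint keys); objective: alternative.

-- ===== PORT A =====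
def pvCRITICAL : PySem.Dict String String := PySem.Dict.mk [
  ("UNPACK_SEQUENCE", "Tuple/list unpacking - common in malicious scripts"),
  ("BUILD_STRING", "F-string construction - used in dynamic code generation"),
  ("FORMAT_VALUE", "F-string value formatting - used in obfuscation"),
  ("LIST_APPEND", "List comprehension optimization - memory attacks"),
  ("SET_ADD", "Set comprehension optimization"),
  ("MAP_ADD", "Dict comprehension optimization"),
  ("YIELD_VALUE", "Generator yield - async malware patterns"),
  ("DELETE_NAME", "Variable deletion - anti-analysis technique"),
  ("DELETE_SUBSCR", "Subscript deletion - data manipulation")]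

def pvHIGH : PySem.Dict String String := PySem.Dict.mk [
  ("BINARY_SUBSCR", "Array/dict access - data exfiltration patterns"),
  ("STORE_SUBSCR", "Array/dict assignment - payload injection"),
  ("BUILD_SLICE", "Slice operations - data manipulation"),
  ("EXTENDED_ARG", "Extended argument support for large constants"),
  ("LOAD_CLOSURE", "Closure loading - advanced obfuscation"),
  ("MAKE_FUNCTION", "Function creation with closure"),
  ("SETUP_EXCEPT", "Exception handling setup - error hiding"),
  ("POP_EXCEPT", "Exception cleanup"),
  ("RERAISE", "Exception reraising")]

def pvMEDIUM : PySem.Dict String String := PySem.Dict.mk [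
  ("SETUP_FINALLY", "Finally block setup"),
  ("SETUP_WITH", "Context manager setup - file operations"),
  ("WITH_CLEANUP_START", "Context manager cleanup"),
  ("WITH_CLEANUP_FINISH", "Context manager cleanup completion"),
  ("GET_AWAITABLE", "Async operations"),
  ("GET_AITER", "Async iteration"),
  ("GET_ANEXT", "Async next"),
  ("BEFORE_ASYNC_WITH", "Async context manager")]

def pvLOW : PySem.Dict String String := PySem.Dict.mk [
  ("SETUP_ANNOTATIONS", "Type annotation setup"),
  ("BUILD_CONST_KEY_MAP", "Constant key mapping optimization"),
  ("DICT_MERGE", "Dictionary merging (Python 3.9+)"),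
  ("DICT_UPDATE", "Dictionary update operations"),
  ("LIST_EXTEND", "List extend operations"),
  ("SET_UPDATE", "Set update operations"),
  ("MATCH_SEQUENCE", "Pattern matching (Python 3.10+)"),
  ("MATCH_MAPPING", "Mapping pattern matching"),
  ("MATCH_CLASS", "Class pattern matching"),
  ("MATCH_KEYS", "Key matching in patterns")]

def pvIGNORABLE : PySem.Dict String String := PySem.Dict.mk [
  ("CACHE", "Internal caching - not relevant for analysis"),
  ("RESUME", "Internal resume operation"),
  ("PRECALL", "Pre-call optimization"),
  ("KW_NAMES", "Keyword argument names"),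
  ("PUSH_NULL", "Internal stack operation"),
  ("COPY", "Internal copy operation"),
  ("SWAP", "Internal swap operation")]

-- the six-key result dict A starts from
def pvInitCategorized : PySem.Dict String (PySem.Dict String String) := PySem.Dict.mk [
  ("Critical", PySem.Dict.mk []),
  ("High Priority", PySem.Dict.mk []),
  ("Medium Priority", PySem.Dict.mk []),
  ("Low Priority", PySem.Dict.mk []),
  ("Ignorable", PySem.Dict.mk []),
  ("Unknown", PySem.Dict.mk [])]

-- A's loop body: the if/elif chain ('opcode in D' + 'D[opcode]' ported as one get? match)
def pvStepA (acc : PySem.Dict String (PySem.Dict String String)) (opcode : String) :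
    PySem.Dict String (PySem.Dict String String) :=
  match pvCRITICAL.get? opcode with
  | some v => acc.modify "Critical" PySem.Dict.empty (fun d => d.insert opcode v)
  | none =>
    match pvHIGH.get? opcode with
    | some v => acc.modify "High Priority" PySem.Dict.empty (fun d => d.insert opcode v)
    | none =>
      match pvMEDIUM.get? opcode with
      | some v => acc.modify "Medium Priority" PySem.Dict.empty (fun d => d.insert opcode v)
      | none =>
        match pvLOW.get? opcode with
        | some v => acc.modify "Low Priority" PySem.Dict.empty (fun d => d.insert opcode v)
        | none =>
          match pvIGNORABLE.get? opcode with
          | some v => acc.modify "Ignorable" PySem.Dict.empty (fun d => d.insert opcode v)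
          | none => acc.modify "Unknown" PySem.Dict.empty
              (fun d => d.insert opcode "Unknown opcode - needs investigation")

def categorize_missing_opcodes (missing_opcodes : List String) : List (String × List (String × String)) :=
  ((missing_opcodes.foldl pvStepA pvInitCategorized).items.map (fun p => (p.1, p.2.items)))

-- ===== PORT B =====
-- the (label, table) list B iterates over
def pvTABLES : List (String × PySem.Dict String String) :=
  [("Critical", pvCRITICAL), ("High Priority", pvHIGH), ("Medium Priority", pvMEDIUM),
   ("Low Priority", pvLOW), ("Ignorable", pvIGNORABLE)]

-- _KNOWN = set().union(*(t.keys() for _, t in _TABLES))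
def pvKNOWN : PySem.Set String :=
  pvTABLES.foldl (fun s p => PySem.Set.update s p.2.keys) PySem.Set.empty

-- one dict comprehension: {op: table[op] for op in l if op in table}
def pvComp (l : List String) (table : PySem.Dict String String) : PySem.Dict String String :=
  l.foldl (fun d op =>
    match table.get? op with
    | some v => d.insert op v
    | none => d) PySem.Dict.empty

-- {op: "Unknown opcode - needs investigation" for op in l if op not in _KNOWN}
def pvCompUnknown (l : List String) : PySem.Dict String String :=
  l.foldl (fun d op =>
    if pvKNOWN.contains op then d
    else d.insert op "Unknown opcode - needs investigation") PySem.Dict.empty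

def categorize_missing_opcodes_alt (missing_opcodes : List String) : List (String × List (String × String)) :=
  let categorized :=
    pvTABLES.foldl (fun r p => r.insert p.1 (pvComp missing_opcodes p.2))
      (PySem.Dict.empty : PySem.Dict String (PySem.Dict String String))
  let categorized := categorized.insert "Unknown" (pvCompUnknown missing_opcodes)
  categorized.items.map (fun p => (p.1, p.2.items))

-- ===== PRECONDITION & SPEC =====
def Spec_categorize_missing_opcodes (missing_opcodes : List String) (out : List (String × List (String × String))) : Prop := out = categorize_missing_opcodes_alt missing_opcodes
instance (missing_opcodes : List String) (out : List (String × List (String × String))) : Decidable (Spec_categorize_missing_opcodes missing_opcodes out) := by unfold Spec_categorize_missing_opcodes; infer_instance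

-- ===== CLAIM (what is proved, stated in full; the proofs are below) =====
def Claim_equal_categorize_missing_opcodes : Prop := ∀ (missing_opcodes : List String), Dom_categorize_missing_opcodes missing_opcodes → Spec_categorize_missing_opcodes missing_opcodes (categorize_missing_opcodes missing_opcodes)

-- ===== LEMMAS AND PROOFS =====

-- shorthand: the six-slot accumulator shape A's fold preserves
def pvMk6 (c h m lo ig un : PySem.Dict String String) : PySem.Dict String (PySem.Dict String String) :=
  PySem.Dict.mk [("Critical", c), ("High Priority", h), ("Medium Priority", m),
                 ("Low Priority", lo), ("Ignorable", ig), ("Unknown", un)]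

-- per-table step (the comprehension step of pvComp, specialised)
def pvG (t : PySem.Dict String String) (d : PySem.Dict String String) (op : String) :
    PySem.Dict String String :=
  match t.get? op with
  | some v => d.insert op v
  | none => d

-- A's unknown step: insert only when all five tables miss
def pvGU (d : PySem.Dict String String) (op : String) : PySem.Dict String String :=
  if (pvCRITICAL.get? op).isSome || (pvHIGH.get? op).isSome || (pvMEDIUM.get? op).isSome
      || (pvLOW.get? op).isSome || (pvIGNORABLE.get? op).isSome then d
  else d.insert op "Unknown opcode - needs investigation"

-- a hit in one table forces a miss in another whose keys are disjoint from it
lemma pv_none_of_disjoint {d e : PySem.Dict String String}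
    (hdisj : ∀ k ∈ d.keys, k ∉ e.keys) {s : String} {v : String}
    (h : d.get? s = some v) : e.get? s = none := by
  have hi : (s, v) ∈ d.items := PySem.Dict.mem_items_of_get?_eq_some d h
  have hs : s ∈ d.keys := PySem.Dict.mem_keys_of_mem_items d hi
  rw [PySem.Dict.get?_eq_none_iff_not_mem_keys]
  exact hdisj s hs

-- A's step on the six-slot shape updates each slot independently
lemma pv_stepA_eq (c h m lo ig un : PySem.Dict String String) (op : String) :
    pvStepA (pvMk6 c h m lo ig un) op =
      pvMk6 (pvG pvCRITICAL c op) (pvG pvHIGH h op) (pvG pvMEDIUM m op)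
            (pvG pvLOW lo op) (pvG pvIGNORABLE ig op) (pvGU un op) := by
  unfold pvStepA pvG pvGU pvMk6
  cases h1 : pvCRITICAL.get? op with
  | some v =>
    rw [pv_none_of_disjoint (by decide) h1, pv_none_of_disjoint (by decide) h1,
        pv_none_of_disjoint (by decide) h1, pv_none_of_disjoint (by decide) h1]
    simp [PySem.Dict.modify, PySem.Dict.getD, PySem.Dict.get?, PySem.Dict.insert,
          PySem.Dict.contains, List.find?, List.map]
  | none =>
  cases h2 : pvHIGH.get? op with
  | some v =>
    rw [pv_none_of_disjoint (by decide) h2, pv_none_of_disjoint (by decide) h2,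
        pv_none_of_disjoint (by decide) h2]
    simp [PySem.Dict.modify, PySem.Dict.getD, PySem.Dict.get?, PySem.Dict.insert,
          PySem.Dict.contains, List.find?, List.map]
  | none =>
  cases h3 : pvMEDIUM.get? op with
  | some v =>
    rw [pv_none_of_disjoint (by decide) h3, pv_none_of_disjoint (by decide) h3]
    simp [PySem.Dict.modify, PySem.Dict.getD, PySem.Dict.get?, PySem.Dict.insert,
          PySem.Dict.contains, List.find?, List.map]
  | none =>
  cases h4 : pvLOW.get? op with
  | some v =>
    rw [pv_none_of_disjoint (by decide) h4]
    simp [PySem.Dict.modify, PySem.Dict.getD, PySem.Dict.get?, PySem.Dict.insert,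
          PySem.Dict.contains, List.find?, List.map]
  | none =>
  cases h5 : pvIGNORABLE.get? op with
  | some v =>
    simp [PySem.Dict.modify, PySem.Dict.getD, PySem.Dict.get?,
          PySem.Dict.insert, PySem.Dict.contains, List.find?, List.map]
  | none =>
    simp [PySem.Dict.modify, PySem.Dict.getD, PySem.Dict.get?,
          PySem.Dict.insert, PySem.Dict.contains, List.find?, List.map]

-- A's fold decomposes into six independent folds
lemma pv_foldA (l : List String) (c h m lo ig un : PySem.Dict String String) :
    l.foldl pvStepA (pvMk6 c h m lo ig un) =
      pvMk6 (l.foldl (pvG pvCRITICAL) c) (l.foldl (pvG pvHIGH) h)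
            (l.foldl (pvG pvMEDIUM) m) (l.foldl (pvG pvLOW) lo)
            (l.foldl (pvG pvIGNORABLE) ig) (l.foldl pvGU un) := by
  induction l generalizing c h m lo ig un with
  | nil => rfl
  | cons x xs ih => rw [List.foldl_cons, pv_stepA_eq, ih]; rfl

-- B's unknown step is A's: 'op not in _KNOWN' ↔ all five tables miss
set_option maxRecDepth 100000 in
lemma pv_unknown_step_eq :
    (fun (d : PySem.Dict String String) op =>
      if pvKNOWN.contains op then d
      else d.insert op "Unknown opcode - needs investigation") = pvGU := by
  funext d op
  unfold pvGU
  have hk : pvKNOWN.contains op =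
      ((pvCRITICAL.get? op).isSome || (pvHIGH.get? op).isSome || (pvMEDIUM.get? op).isSome
        || (pvLOW.get? op).isSome || (pvIGNORABLE.get? op).isSome) := by
    have hmem : pvKNOWN.contains op = true ↔
        (op ∈ pvCRITICAL.keys ∨ op ∈ pvHIGH.keys ∨ op ∈ pvMEDIUM.keys
          ∨ op ∈ pvLOW.keys ∨ op ∈ pvIGNORABLE.keys) := by
      have hKeq : pvKNOWN = pvCRITICAL.keys ++ pvHIGH.keys ++ pvMEDIUM.keys
          ++ pvLOW.keys ++ pvIGNORABLE.keys := by decide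
      rw [PySem.Set.contains_iff, hKeq]
      simp [List.mem_append]
    have hsome : ∀ t : PySem.Dict String String, (t.get? op).isSome = true ↔ op ∈ t.keys := by
      intro t
      rw [Option.isSome_iff_ne_none, ne_eq, PySem.Dict.get?_eq_none_iff_not_mem_keys, not_not]
    by_cases hc : pvKNOWN.contains op = true
    · rw [hc]
      rcases hmem.mp hc with h | h | h | h | h <;> simp [(hsome _).mpr h]
    · have hc' : pvKNOWN.contains op = false := by
        cases hcc : pvKNOWN.contains op
        · rfl
        · exact absurd hcc hc
      rw [hc']
      have hns := (not_iff_not.mpr hmem).mp hc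
      have n1 : op ∉ pvCRITICAL.keys := fun h => hns (Or.inl h)
      have n2 : op ∉ pvHIGH.keys := fun h => hns (Or.inr (Or.inl h))
      have n3 : op ∉ pvMEDIUM.keys := fun h => hns (Or.inr (Or.inr (Or.inl h)))
      have n4 : op ∉ pvLOW.keys := fun h => hns (Or.inr (Or.inr (Or.inr (Or.inl h))))
      have n5 : op ∉ pvIGNORABLE.keys := fun h => hns (Or.inr (Or.inr (Or.inr (Or.inr h))))
      simp [(PySem.Dict.get?_eq_none_iff_not_mem_keys pvCRITICAL op).mpr n1,
            (PySem.Dict.get?_eq_none_iff_not_mem_keys pvHIGH op).mpr n2,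
            (PySem.Dict.get?_eq_none_iff_not_mem_keys pvMEDIUM op).mpr n3,
            (PySem.Dict.get?_eq_none_iff_not_mem_keys pvLOW op).mpr n4,
            (PySem.Dict.get?_eq_none_iff_not_mem_keys pvIGNORABLE op).mpr n5]
  rw [hk]

-- ===== VERDICT (by name: the statement is the Claim_ definition above) =====
theorem categorize_missing_opcodes_spec : Claim_equal_categorize_missing_opcodes := by
  intro l _
  unfold Spec_categorize_missing_opcodes categorize_missing_opcodes categorize_missing_opcodes_alt
  have hinit : pvInitCategorized =
      pvMk6 (PySem.Dict.mk []) (PySem.Dict.mk []) (PySem.Dict.mk [])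
            (PySem.Dict.mk []) (PySem.Dict.mk []) (PySem.Dict.mk []) := rfl
  rw [hinit, pv_foldA]
  have hB : (pvTABLES.foldl (fun r p => r.insert p.1 (pvComp l p.2))
        (PySem.Dict.empty : PySem.Dict String (PySem.Dict String String))).insert
        "Unknown" (pvCompUnknown l) =
      pvMk6 (pvComp l pvCRITICAL) (pvComp l pvHIGH) (pvComp l pvMEDIUM)
            (pvComp l pvLOW) (pvComp l pvIGNORABLE) (pvCompUnknown l) := by
    rfl
  simp only [hB]
  unfold pvMk6 pvComp pvCompUnknown pvG
  rw [pv_unknown_step_eq]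
  rfl
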